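-- pv_equiv track=rewrite | github.com/fullscreen-triangle/lavoisier | validation/core/oscillatory_hierarchy.py | _formula_to_words
-- ===== SOURCE A (Python) =====
-- from typing import Dict, List, Any, Optional, Tuple, Set
--
-- def _formula_to_words(formula: str) -> List[str]:
--     """Convert molecular formula to words"""
--     words = []
--
--     # Element mapping
--     element_words = {
--         'C': 'carbon', 'H': 'hydrogen', 'N': 'nitrogen', 'O': 'oxygen',
--         'P': 'phosphorus', 'S': 'sulfur', 'Cl': 'chlorine', 'Br': 'bromine'
--     }
--
--     # Simple parsing (could be more sophisticated)
--     i = 0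
--     while i < len(formula):
--         if formula[i].isupper():
--             element = formula[i]
--             i += 1
--
--             # Check for two-letter element
--             if i < len(formula) and formula[i].islower():
--                 element += formula[i]
--                 i += 1
--
--             # Get element word
--             element_word = element_words.get(element, element.lower())
--             words.append(element_word)
--
--             # Get count if present
--             count_str = ''
--             while i < len(formula) and formula[i].isdigit():
--                 count_str += formula[i]
--                 i += 1
--
--             if count_str:
--                 count = int(count_str)
--                 if count > 1:
--                     words.append('multiple')
--                     words.append(element_word)
--         else:
--             i += 1
--
--     return words
-- ===== SOURCE B (Python) =====
-- from typing import List
--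
-- _ELEMENT_WORDS = {
--     'C': 'carbon', 'H': 'hydrogen', 'N': 'nitrogen', 'O': 'oxygen',
--     'P': 'phosphorus', 'S': 'sulfur', 'Cl': 'chlorine', 'Br': 'bromine'
-- }
--
--
-- def _formula_to_words(formula: str) -> List[str]:
--     """Convert molecular formula to words (single-pass DFA tokenizer, then emit)."""
--     # Phase 1: one DFA pass over the characters, producing (symbol, digits) pairs.
--     # mode 0: just saw the uppercase start (a lowercase may still attach)
--     # mode 1: digits may still attach to the current token
--     # mode 2: skipping until the next uppercase letter
--     pairs = []
--     elem = None
--     digits = ''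
--     mode = 2
--     for c in formula:
--         if 'A' <= c <= 'Z':
--             if elem is not None:
--                 pairs.append((elem, digits))
--             elem, digits, mode = c, '', 0
--         elif 'a' <= c <= 'z':
--             if mode == 0:
--                 elem += c
--                 mode = 1
--             else:
--                 mode = 2
--         elif '0' <= c <= '9':
--             if mode <= 1:
--                 digits += c
--                 mode = 1
--             else:
--                 mode = 2
--         else:
--             mode = 2
--     if elem is not None:
--         pairs.append((elem, digits))
--
--     # Phase 2: map each token to its word(s).
--     out = []
--     for elem, digits in pairs:
--         word = _ELEMENT_WORDS.get(elem, elem.lower())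
--         out.append(word)
--         if digits and int(digits) > 1:
--             out += ['multiple', word]
--     return out
-- ===== Notes on version B (the rewrite author's own statement) =====
-- stated objective: alternative
-- what changed: Replaces A's index-based scanner with nested lookahead/digit loops by a two-phase design: a single-pass character DFA that tokenizes the formula into (symbol, digits) pairs, followed by a separate emit pass mapping pairs to words.
import Mathlib
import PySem

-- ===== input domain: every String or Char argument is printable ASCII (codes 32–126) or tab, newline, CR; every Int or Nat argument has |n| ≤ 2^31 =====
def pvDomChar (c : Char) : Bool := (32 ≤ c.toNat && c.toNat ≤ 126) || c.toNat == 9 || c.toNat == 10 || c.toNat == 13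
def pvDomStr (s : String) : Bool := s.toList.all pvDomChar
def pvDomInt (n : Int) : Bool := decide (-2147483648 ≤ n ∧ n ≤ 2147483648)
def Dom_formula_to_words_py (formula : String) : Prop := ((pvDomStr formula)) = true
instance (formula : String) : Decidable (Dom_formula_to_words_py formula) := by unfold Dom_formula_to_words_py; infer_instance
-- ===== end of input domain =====

-- B restructures A's index-based scanner as a single-pass tokenizing DFA plus a separate emit pass (objective: alternative).

-- ===== PORT A =====
-- the element_words dict literal (shared verbatim by both Pythons)
def pvElementWords : PySem.Dict String String :=
  PySem.Dict.ofList [("C", "carbon"), ("H", "hydrogen"), ("N", "nitrogen"), ("O", "oxygen"),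
    ("P", "phosphorus"), ("S", "sulfur"), ("Cl", "chlorine"), ("Br", "bromine")]

-- element_words.get(element, element.lower())  (shared verbatim by both Pythons)
def pvWordOf (element : String) : String :=
  (pvElementWords.get? element).getD (PySem.Str.lower element)

-- A's inner `while … isdigit()` loop: returns (count_str chars, rest)
def pvTakeDigits : List Char → List Char × List Char
  | [] => ([], [])
  | c :: rest =>
    if PySem.Chars.isdigit c then
      let p := pvTakeDigits rest
      (c :: p.1, p.2)
    else ([], c :: rest)

theorem pvTakeDigits_len : ∀ l : List Char, (pvTakeDigits l).2.length ≤ l.length := by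
  intro l
  induction l with
  | nil => simp [pvTakeDigits]
  | cons c rest ih =>
    simp only [pvTakeDigits]
    split
    · simpa using Nat.le_succ_of_le ih
    · simp

-- A's count_str handling: `if count_str: count = int(count_str); if count > 1: …`
def pvCountWords (w : String) (ds : List Char) (tail : List String) : List String :=
  if ds ≠ [] then
    if (PySem.Int.ofStr? (String.mk ds)).getD 0 > 1 then w :: "multiple" :: w :: tail
    else w :: tail
  else w :: tail

-- A's outer while loop, index advance ported as consuming the char list
def formula_to_words_py_go : List Char → List String
  | [] => []
  | c :: rest =>
    if PySem.Chars.isupper c then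
      match rest with
      | c2 :: rest' =>
        if PySem.Chars.islower c2 then
          let p := pvTakeDigits rest'
          pvCountWords (pvWordOf (String.mk [c, c2])) p.1 (formula_to_words_py_go p.2)
        else
          let p := pvTakeDigits (c2 :: rest')
          pvCountWords (pvWordOf (String.mk [c])) p.1 (formula_to_words_py_go p.2)
      | [] => [pvWordOf (String.mk [c])]
    else formula_to_words_py_go rest
termination_by l => l.length
decreasing_by
  · have := pvTakeDigits_len rest'
    simp at *; omega
  · have := pvTakeDigits_len (c2 :: rest')
    simp at *; omega
  · simp

def formula_to_words_py (formula : String) : List String :=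
  formula_to_words_py_go formula.toList

-- ===== PORT B =====
-- DFA state: (pairs, current element chars, its digit chars, mode); Python strings elem/digits tracked as char lists (exact on the ASCII domain)
def pvStep (st : List (List Char × List Char) × Option (List Char) × List Char × Nat) (c : Char) :
    List (List Char × List Char) × Option (List Char) × List Char × Nat :=
  let (pairs, elem, digits, mode) := st
  if 'A' ≤ c ∧ c ≤ 'Z' then
    ((match elem with
      | some e => pairs ++ [(e, digits)]
      | none => pairs), some [c], [], 0)
  else if 'a' ≤ c ∧ c ≤ 'z' then
    if mode = 0 then (pairs, elem.map (· ++ [c]), digits, 1)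
    else (pairs, elem, digits, 2)
  else if '0' ≤ c ∧ c ≤ '9' then
    if mode ≤ 1 then (pairs, elem, digits ++ [c], 1)
    else (pairs, elem, digits, 2)
  else (pairs, elem, digits, 2)

-- final `if elem is not None: pairs.append((elem, digits))`
def pvFlush (st : List (List Char × List Char) × Option (List Char) × List Char × Nat) :
    List (List Char × List Char) :=
  match st.2.1 with
  | some e => st.1 ++ [(e, st.2.2.1)]
  | none => st.1

-- Phase 2 body for one pair: the word, plus ['multiple', word] when int(digits) > 1
def pvWordList (p : List Char × List Char) : List String :=
  let w := pvWordOf (String.mk p.1)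
  if p.2 ≠ [] ∧ (PySem.Int.ofStr? (String.mk p.2)).getD 0 > 1
  then [w, "multiple", w] else [w]

-- Phase 2: the emit loop over the pairs
def pvEmit (pairs : List (List Char × List Char)) : List String :=
  pairs.foldl (fun out p => out ++ pvWordList p) []

def formula_to_words_py_alt (formula : String) : List String :=
  pvEmit (pvFlush (formula.toList.foldl pvStep ([], none, [], 2)))

-- ===== PRECONDITION & SPEC =====
def Spec_formula_to_words_py (formula : String) (out : List String) : Prop := out = formula_to_words_py_alt formula
instance (formula : String) (out : List String) : Decidable (Spec_formula_to_words_py formula out) := by unfold Spec_formula_to_words_py; infer_instance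

-- ===== CLAIM (what is proved, stated in full; the proofs are below) =====
def Claim_equal_formula_to_words_py : Prop := ∀ (formula : String), Dom_formula_to_words_py formula → Spec_formula_to_words_py formula (formula_to_words_py formula)


-- ===== LEMMAS AND PROOFS =====

-- char-class bridges and disjointness
theorem pv_up_iff (c : Char) : PySem.Chars.isupper c = true ↔ ('A' ≤ c ∧ c ≤ 'Z') := by
  simp [PySem.Chars.isupper]

theorem pv_lo_iff (c : Char) : PySem.Chars.islower c = true ↔ ('a' ≤ c ∧ c ≤ 'z') := by
  simp [PySem.Chars.islower]

theorem pv_dg_iff (c : Char) : PySem.Chars.isdigit c = true ↔ ('0' ≤ c ∧ c ≤ '9') := by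
  simp [PySem.Chars.isdigit]

theorem pv_lo_not_up {c : Char} (h : 'a' ≤ c ∧ c ≤ 'z') : ¬ ('A' ≤ c ∧ c ≤ 'Z') := by
  rintro ⟨-, h2⟩
  exact absurd (le_trans h.1 h2) (by decide)

theorem pv_dg_not_up {c : Char} (h : '0' ≤ c ∧ c ≤ '9') : ¬ ('A' ≤ c ∧ c ≤ 'Z') := by
  rintro ⟨h1, -⟩
  exact absurd (le_trans h1 h.2) (by decide)

theorem pv_dg_not_lo {c : Char} (h : '0' ≤ c ∧ c ≤ '9') : ¬ ('a' ≤ c ∧ c ≤ 'z') := by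
  rintro ⟨h1, -⟩
  exact absurd (le_trans h1 h.2) (by decide)

-- step lemmas for the DFA
theorem pvStep_upper {c : Char} (h : 'A' ≤ c ∧ c ≤ 'Z')
    (p : List (List Char × List Char)) (eo : Option (List Char)) (d : List Char) (m : Nat) :
    pvStep (p, eo, d, m) c = (pvFlush (p, eo, d, m), some [c], [], 0) := by
  cases eo <;> simp [pvStep, pvFlush, h]

theorem pvStep_lower0 {c : Char} (h : 'a' ≤ c ∧ c ≤ 'z')
    (p : List (List Char × List Char)) (eo : Option (List Char)) (d : List Char) :
    pvStep (p, eo, d, 0) c = (p, eo.map (· ++ [c]), d, 1) := by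
  simp [pvStep, h, pv_lo_not_up h]

theorem pvStep_lower_ne0 {c : Char} (h : 'a' ≤ c ∧ c ≤ 'z') {m : Nat} (hm : m ≠ 0)
    (p : List (List Char × List Char)) (eo : Option (List Char)) (d : List Char) :
    pvStep (p, eo, d, m) c = (p, eo, d, 2) := by
  simp [pvStep, h, pv_lo_not_up h, hm]

theorem pvStep_digit_le1 {c : Char} (h : '0' ≤ c ∧ c ≤ '9') {m : Nat} (hm : m ≤ 1)
    (p : List (List Char × List Char)) (eo : Option (List Char)) (d : List Char) :
    pvStep (p, eo, d, m) c = (p, eo, d ++ [c], 1) := by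
  simp [pvStep, h, pv_dg_not_up h, pv_dg_not_lo h, hm]

theorem pvStep_dead {c : Char} (hc : ¬ ('A' ≤ c ∧ c ≤ 'Z'))
    (p : List (List Char × List Char)) (eo : Option (List Char)) (d : List Char) :
    pvStep (p, eo, d, 2) c = (p, eo, d, 2) := by
  by_cases hl : 'a' ≤ c ∧ c ≤ 'z'
  · exact pvStep_lower_ne0 hl (by decide) p eo d
  · by_cases hd : '0' ≤ c ∧ c ≤ '9'
    · simp [pvStep, hc, hl, hd]
    · simp [pvStep, hc, hl, hd]

-- flush on explicit states
theorem pvFlush_some (p : List (List Char × List Char)) (e d : List Char) (m : Nat) :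
    pvFlush (p, some e, d, m) = p ++ [(e, d)] := rfl

theorem pvFlush_none (p : List (List Char × List Char)) (d : List Char) (m : Nat) :
    pvFlush (p, none, d, m) = p := rfl

-- emit is a flatMap
theorem pvEmit_foldl (pairs : List (List Char × List Char)) :
    ∀ init : List String,
      pairs.foldl (fun out p => out ++ pvWordList p) init = init ++ pairs.flatMap pvWordList := by
  induction pairs with
  | nil => simp
  | cons q qs ih => intro init; simp [List.foldl_cons, ih]

theorem pvEmit_eq (pairs : List (List Char × List Char)) :
    pvEmit pairs = pairs.flatMap pvWordList := by
  rw [pvEmit, pvEmit_foldl pairs []]; simp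

theorem pvEmit_append (p : List (List Char × List Char)) (x : List Char × List Char) :
    pvEmit (p ++ [x]) = pvEmit p ++ pvWordList x := by
  simp [pvEmit_eq]

-- A's count branch equals B's word list for one pair
theorem pvCountWords_eq (e ds : List Char) (tail : List String) :
    pvCountWords (pvWordOf (String.mk e)) ds tail = pvWordList (e, ds) ++ tail := by
  by_cases h : ds ≠ [] ∧ (PySem.Int.ofStr? (String.mk ds)).getD 0 > 1
  · simp [pvCountWords, pvWordList, h.1, h.2]
  · simp only [pvWordList, pvCountWords]
    by_cases h1 : ds = []
    · simp [h1]
    · have h2 : ¬ (PySem.Int.ofStr? (String.mk ds)).getD 0 > 1 := by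
        intro hgt; exact h ⟨h1, hgt⟩
      simp [h1, h2]

-- pvTakeDigits splits its input into digits and a rest whose head is not a digit
theorem pvTakeDigits_split : ∀ l : List Char,
    (pvTakeDigits l).1 ++ (pvTakeDigits l).2 = l ∧
    (∀ c ∈ (pvTakeDigits l).1, '0' ≤ c ∧ c ≤ '9') ∧
    (∀ c r', (pvTakeDigits l).2 = c :: r' → ¬ ('0' ≤ c ∧ c ≤ '9')) := by
  intro l
  induction l with
  | nil => simp [pvTakeDigits]
  | cons c rest ih =>
    by_cases hd : PySem.Chars.isdigit c = true
    · refine ⟨?_, ?_, ?_⟩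
      · simp [pvTakeDigits, hd, ih.1]
      · intro x hx
        simp [pvTakeDigits, hd] at hx
        rcases hx with h | h
        · exact h ▸ (pv_dg_iff c).mp hd
        · exact ih.2.1 x h
      · intro x r' hx
        simp [pvTakeDigits, hd] at hx
        exact ih.2.2 x r' hx
    · refine ⟨?_, ?_, ?_⟩
      · simp [pvTakeDigits, hd]
      · intro x hx; simp [pvTakeDigits, hd] at hx
      · intro x r' hx
        simp [pvTakeDigits, hd] at hx
        intro hcon
        rw [← hx.1] at hcon
        exact hd ((pv_dg_iff c).mpr hcon)

-- consuming a block of digits from mode ≤ 1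
theorem pvDigits : ∀ ds : List Char, (∀ c ∈ ds, '0' ≤ c ∧ c ≤ '9') →
    ∀ (r : List Char) (p : List (List Char × List Char)) (e d : List Char) (m : Nat), m ≤ 1 →
    (ds ++ r).foldl pvStep (p, some e, d, m) =
      r.foldl pvStep (p, some e, d ++ ds, if ds = [] then m else 1) := by
  intro ds
  induction ds with
  | nil => intro _ r p e d m _; simp
  | cons c ds' ih =>
    intro hds r p e d m hm
    have hc : '0' ≤ c ∧ c ≤ '9' := hds c (by simp)
    have hds' : ∀ x ∈ ds', '0' ≤ x ∧ x ≤ '9' := fun x hx => hds x (by simp [hx])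
    rw [List.cons_append, List.foldl_cons, pvStep_digit_le1 hc hm,
        ih hds' r p e (d ++ [c]) 1 (le_refl 1)]
    by_cases h : ds' = [] <;> simp [h]


-- equation lemmas for A's recursion
theorem pvGo_nil : formula_to_words_py_go [] = [] := by
  simp [formula_to_words_py_go]

theorem pvGo_not_upper {c : Char} (h : PySem.Chars.isupper c = false) (rest : List Char) :
    formula_to_words_py_go (c :: rest) = formula_to_words_py_go rest := by
  rw [formula_to_words_py_go.eq_def]; simp [h]

theorem pvGo_upper_nil {c : Char} (h : PySem.Chars.isupper c = true) :
    formula_to_words_py_go [c] = [pvWordOf (String.mk [c])] := by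
  rw [formula_to_words_py_go.eq_def]; simp [h]

theorem pvGo_upper_lower {c c2 : Char} (h : PySem.Chars.isupper c = true)
    (h2 : PySem.Chars.islower c2 = true) (rest' : List Char) :
    formula_to_words_py_go (c :: c2 :: rest') =
      pvCountWords (pvWordOf (String.mk [c, c2])) (pvTakeDigits rest').1
        (formula_to_words_py_go (pvTakeDigits rest').2) := by
  rw [formula_to_words_py_go.eq_def]; simp [h, h2]

theorem pvGo_upper_not_lower {c c2 : Char} (h : PySem.Chars.isupper c = true)
    (h2 : PySem.Chars.islower c2 = false) (rest' : List Char) :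
    formula_to_words_py_go (c :: c2 :: rest') =
      pvCountWords (pvWordOf (String.mk [c])) (pvTakeDigits (c2 :: rest')).1
        (formula_to_words_py_go (pvTakeDigits (c2 :: rest')).2) := by
  rw [formula_to_words_py_go.eq_def]; simp [h, h2]

-- the main simulation: from any mode-2 state, running the DFA appends exactly A's words
theorem pvMainAux : ∀ (n : Nat) (chars : List Char), chars.length ≤ n →
    ∀ (p : List (List Char × List Char)) (eo : Option (List Char)) (d : List Char),
    pvEmit (pvFlush (chars.foldl pvStep (p, eo, d, 2))) =
    pvEmit (pvFlush (p, eo, d, 2)) ++ formula_to_words_py_go chars := by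
  intro n
  induction n with
  | zero =>
    intro chars h p eo d
    have hnil : chars = [] := List.eq_nil_of_length_eq_zero (Nat.le_zero.mp h)
    subst hnil; simp [pvGo_nil]
  | succ n ih =>
    intro chars hlen p eo d
    match chars with
    | [] => simp [pvGo_nil]
    | c :: rest =>
      have hrest : rest.length ≤ n := by simp at hlen; omega
      by_cases hc : 'A' ≤ c ∧ c ≤ 'Z'
      case neg =>
        have hcB : PySem.Chars.isupper c = false := by
          rw [Bool.eq_false_iff]; intro hB; exact hc ((pv_up_iff c).mp hB)
        rw [List.foldl_cons, pvStep_dead hc, ih rest hrest p eo d, pvGo_not_upper hcB]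
      case pos =>
      have hcB : PySem.Chars.isupper c = true := (pv_up_iff c).mpr hc
      rw [List.foldl_cons, pvStep_upper hc]
      -- after the digits of the current token: head of r is not a digit, mode is 1
      have AD : ∀ (r : List Char), r.length ≤ n →
          (∀ c3 r', r = c3 :: r' → ¬ ('0' ≤ c3 ∧ c3 ≤ '9')) →
          ∀ (q : List (List Char × List Char)) (e dd : List Char),
          pvEmit (pvFlush (r.foldl pvStep (q, some e, dd, 1))) =
          pvEmit (q ++ [(e, dd)]) ++ formula_to_words_py_go r := by
        intro r hr hnd q e dd
        match r with
        | [] => simp [pvFlush_some, pvGo_nil]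
        | c3 :: r' =>
          have hr' : r'.length ≤ n := by simp at hr; omega
          have hd3 := hnd c3 r' rfl
          by_cases h3 : 'A' ≤ c3 ∧ c3 ≤ 'Z'
          · rw [List.foldl_cons, pvStep_upper h3, pvFlush_some]
            have key := ih (c3 :: r') (by simpa using hr) (q ++ [(e, dd)]) none []
            rw [List.foldl_cons, pvStep_upper h3, pvFlush_none] at key
            exact key
          · have h3B : PySem.Chars.isupper c3 = false := by
              rw [Bool.eq_false_iff]; intro hB; exact h3 ((pv_up_iff c3).mp hB)
            have hstep : pvStep (q, some e, dd, 1) c3 = (q, some e, dd, 2) := by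
              by_cases hl : 'a' ≤ c3 ∧ c3 ≤ 'z'
              · exact pvStep_lower_ne0 hl (by decide) q (some e) dd
              · simp [pvStep, h3, hl, hd3]
            rw [List.foldl_cons, hstep, ih r' hr' q (some e) dd, pvFlush_some,
                pvGo_not_upper h3B]
      cases rest with
      | nil =>
        simp [pvFlush_some, pvEmit_append, pvGo_upper_nil hcB, pvWordList]
      | cons c2 rest' =>
        have hrest' : rest'.length ≤ n := by simp at hrest ⊢; omega
        by_cases h2 : 'a' ≤ c2 ∧ c2 ≤ 'z'
        · have h2B : PySem.Chars.islower c2 = true := (pv_lo_iff c2).mpr h2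
          rw [List.foldl_cons, pvStep_lower0 h2]
          obtain ⟨ds, r, hTD⟩ : ∃ ds r, pvTakeDigits rest' = (ds, r) := ⟨_, _, rfl⟩
          obtain ⟨hsp, hds, hhd⟩ := pvTakeDigits_split rest'
          rw [hTD] at hsp hds hhd
          have hrlen : r.length ≤ n := by
            have := congrArg List.length hsp; simp at this; omega
          have hfold : rest'.foldl pvStep (pvFlush (p, eo, d, 2), some ([c] ++ [c2]), [], 1) =
              r.foldl pvStep (pvFlush (p, eo, d, 2), some [c, c2], [] ++ ds, if ds = [] then 1 else 1) := by
            rw [← hsp]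
            exact pvDigits ds hds r _ [c, c2] [] 1 (le_refl 1)
          simp only [Option.map_some, List.singleton_append] at *
          rw [hfold]
          simp only [ite_self, List.nil_append]
          rw [AD r hrlen hhd _ [c, c2] ds, pvEmit_append,
              pvGo_upper_lower hcB h2B, hTD, pvCountWords_eq]
          simp
        · have h2B : PySem.Chars.islower c2 = false := by
            rw [Bool.eq_false_iff]; intro hB; exact h2 ((pv_lo_iff c2).mp hB)
          by_cases hd2 : '0' ≤ c2 ∧ c2 ≤ '9'
          · obtain ⟨ds, r, hTD⟩ : ∃ ds r, pvTakeDigits (c2 :: rest') = (ds, r) := ⟨_, _, rfl⟩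
            obtain ⟨hsp, hds, hhd⟩ := pvTakeDigits_split (c2 :: rest')
            rw [hTD] at hsp hds hhd
            have hne : ds ≠ [] := by
              intro h0
              rw [h0] at hsp
              simp at hsp
              exact (hhd c2 rest' hsp) hd2
            have hrlen : r.length ≤ n := by
              have := congrArg List.length hsp
              simp at this hrest
              omega
            have hfold : (c2 :: rest').foldl pvStep (pvFlush (p, eo, d, 2), some [c], [], 0) =
                r.foldl pvStep (pvFlush (p, eo, d, 2), some [c], [] ++ ds, if ds = [] then 0 else 1) := by
              rw [← hsp]
              exact pvDigits ds hds r _ [c] [] 0 (by omega)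
            rw [hfold]
            simp only [if_neg hne, List.nil_append]
            rw [AD r hrlen hhd _ [c] ds, pvEmit_append,
                pvGo_upper_not_lower hcB h2B, hTD, pvCountWords_eq]
            simp
          · have hTD0 : pvTakeDigits (c2 :: rest') = ([], c2 :: rest') := by
              have : PySem.Chars.isdigit c2 = false := by
                rw [Bool.eq_false_iff]; intro hB; exact hd2 ((pv_dg_iff c2).mp hB)
              simp [pvTakeDigits, this]
            by_cases h2u : 'A' ≤ c2 ∧ c2 ≤ 'Z'
            · rw [List.foldl_cons, pvStep_upper h2u, pvFlush_some]
              have key := ih (c2 :: rest') (by simpa using hrest) (pvFlush (p, eo, d, 2) ++ [([c], [])]) none []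
              rw [List.foldl_cons, pvStep_upper h2u, pvFlush_none] at key
              rw [key, pvEmit_append, pvGo_upper_not_lower hcB h2B, hTD0, pvCountWords_eq]
              simp [pvWordList]
            · have h2uB : PySem.Chars.isupper c2 = false := by
                rw [Bool.eq_false_iff]; intro hB; exact h2u ((pv_up_iff c2).mp hB)
              have hstep : pvStep (pvFlush (p, eo, d, 2), some [c], [], 0) c2 =
                  (pvFlush (p, eo, d, 2), some [c], [], 2) := by
                simp [pvStep, h2u, h2, hd2]
              rw [List.foldl_cons, hstep, ih rest' hrest' _ (some [c]) [], pvFlush_some,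
                  pvEmit_append, pvGo_upper_not_lower hcB h2B, hTD0, pvCountWords_eq,
                  pvGo_not_upper h2uB]
              simp [pvWordList]

-- ===== VERDICT (by name: the statement is the Claim_ definition above) =====
theorem formula_to_words_py_spec : Claim_equal_formula_to_words_py := by
  unfold Claim_equal_formula_to_words_py Spec_formula_to_words_py
  intro formula _
  rw [formula_to_words_py, formula_to_words_py_alt,
      pvMainAux formula.toList.length formula.toList (le_refl _) [] none []]
  simp [pvFlush_none, pvEmit]
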